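-- pv_equiv track=rewrite | github.com/tumrmutl/c-lab-management | temp/BACKUP-3_check_dup_basic.py | group_files_by_lab
-- ===== SOURCE A (Python) =====
-- def group_files_by_lab(files):
--     lab_groups = {}
--     for file in files:
--         parts = file.split('_')
--         lab_id = parts[-1].split('.')[0]
--         if lab_id not in lab_groups:
--             lab_groups[lab_id] = []
--         lab_groups[lab_id].append(file)
--     return lab_groups
-- ===== SOURCE B (Python) =====
-- def group_files_by_lab(files):
--     # alternative decomposition: dedup the lab-id keys once, then build each
--     # group with a per-key filter (dict.fromkeys preserves first-occurrence order)
--     def lab_id(f):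
--         return f.split('_')[-1].split('.')[0]
--     keys = list(dict.fromkeys(lab_id(f) for f in files))
--     return {k: [f for f in files if lab_id(f) == k] for k in keys}
-- ===== Notes on version B (the rewrite author's own statement) =====
-- stated objective: alternative
-- what changed: Replaces the single-pass dict-accumulator loop by a two-phase construction: dedup the lab-id keys once with dict.fromkeys, then build each group by filtering the file list per key.
import Mathlib
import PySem

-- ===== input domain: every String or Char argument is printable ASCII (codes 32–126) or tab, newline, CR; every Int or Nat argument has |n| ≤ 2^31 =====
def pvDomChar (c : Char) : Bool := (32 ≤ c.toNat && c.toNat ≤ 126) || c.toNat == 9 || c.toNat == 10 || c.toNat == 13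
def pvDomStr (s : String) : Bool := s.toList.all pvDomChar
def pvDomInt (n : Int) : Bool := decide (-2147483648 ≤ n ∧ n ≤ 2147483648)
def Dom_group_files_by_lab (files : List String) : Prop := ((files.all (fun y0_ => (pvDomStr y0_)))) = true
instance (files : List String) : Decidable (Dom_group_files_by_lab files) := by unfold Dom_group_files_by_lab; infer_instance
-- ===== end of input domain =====

-- B groups by the same lab-id key but via dedup-keys-then-filter instead of A's
-- single-pass dict accumulator; equal results, no speed claim.

-- ===== PORT A =====
-- parts[-1] and [0] ported with pyGet?; split never returns [], so the getD "" default is never used (both ports are total).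
def group_files_by_lab (files : List String) : List (String × List String) :=
  (files.foldl (fun lab_groups file =>
      let parts := (PySem.Str.split? file "_").getD []
      let lab_id := (PySem.List.pyGet?
        ((PySem.Str.split? ((PySem.List.pyGet? parts (-1)).getD "") ".").getD []) 0).getD ""
      let d := if lab_groups.contains lab_id then lab_groups
               else lab_groups.insert lab_id ([] : List String)
      d.modify lab_id [] (· ++ [file]))
    PySem.Dict.empty).items

-- ===== PORT B =====
def pvLabId (f : String) : String :=
  (PySem.List.pyGet?
    ((PySem.Str.split? ((PySem.List.pyGet? ((PySem.Str.split? f "_").getD []) (-1)).getD "") ".").getD []) 0).getD ""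

def group_files_by_lab_alt (files : List String) : List (String × List String) :=
  (PySem.List.dedup (files.map pvLabId)).map
    (fun k => (k, files.filter (fun f => pvLabId f == k)))

-- ===== PRECONDITION & SPEC =====
def Spec_group_files_by_lab (files : List String) (out : List (String × List String)) : Prop := out = group_files_by_lab_alt files
instance (files : List String) (out : List (String × List String)) : Decidable (Spec_group_files_by_lab files out) := by unfold Spec_group_files_by_lab; infer_instance

-- ===== CLAIM (what is proved, stated in full; the proofs are below) =====
def Claim_equal_group_files_by_lab : Prop := ∀ (files : List String), Dom_group_files_by_lab files → Spec_group_files_by_lab files (group_files_by_lab files)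

-- ===== LEMMAS AND PROOFS =====

-- A's "if absent insert []; then append" step is exactly modify with default [].
lemma step_eq_modify (d : PySem.Dict String (List String)) (k : String) (f : String) :
    (if d.contains k then d else d.insert k ([] : List String)).modify k [] (· ++ [f])
      = d.modify k [] (· ++ [f]) := by
  by_cases h : d.contains k
  · simp [h]
  · rw [if_neg h]
    simp only [PySem.Dict.modify]
    rw [PySem.Dict.getD_insert_self, PySem.Dict.insert_insert_self,
        PySem.Dict.getD_of_not_contains d [] (by simpa using h)]

-- A's loop, with the branch folded away, keyed by pvLabId.
lemma foldA_eq (files : List String) :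
    files.foldl (fun lab_groups file =>
      let parts := (PySem.Str.split? file "_").getD []
      let lab_id := (PySem.List.pyGet?
        ((PySem.Str.split? ((PySem.List.pyGet? parts (-1)).getD "") ".").getD []) 0).getD ""
      let d := if lab_groups.contains lab_id then lab_groups
               else lab_groups.insert lab_id ([] : List String)
      d.modify lab_id [] (· ++ [file])) PySem.Dict.empty
    = files.foldl (fun d file => d.modify (pvLabId file) [] (· ++ [file])) PySem.Dict.empty := by
  have h : (fun (d : PySem.Dict String (List String)) (file : String) =>
      let parts := (PySem.Str.split? file "_").getD []
      let lab_id := (PySem.List.pyGet?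
        ((PySem.Str.split? ((PySem.List.pyGet? parts (-1)).getD "") ".").getD []) 0).getD ""
      let d' := if d.contains lab_id then d else d.insert lab_id ([] : List String)
      d'.modify lab_id [] (· ++ [file]))
      = (fun d file => d.modify (pvLabId file) [] (· ++ [file])) := by
    funext d file
    exact step_eq_modify d (pvLabId file) file
  rw [h]

-- ===== VERDICT (by name: the statement is the Claim_ definition above) =====
theorem group_files_by_lab_spec : Claim_equal_group_files_by_lab := by
  intro files _
  show group_files_by_lab files = group_files_by_lab_alt files
  unfold group_files_by_lab group_files_by_lab_alt
  rw [foldA_eq]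
  have hfold : files.foldl (fun d file => d.modify (pvLabId file) [] (· ++ [file])) PySem.Dict.empty
      = (files.map (fun f => (pvLabId f, f))).foldl
          (fun d p => d.modify p.1 [] (· ++ [p.2])) PySem.Dict.empty := by
    rw [List.foldl_map]
  have hnd : (files.foldl (fun d file => d.modify (pvLabId file) [] (· ++ [file]))
      PySem.Dict.empty).keys.Nodup :=
    PySem.Dict.nodup_keys_foldl_modify_key files pvLabId [] (fun _ file => (· ++ [file]))
      PySem.Dict.empty (by simp)
  rw [PySem.Dict.items_eq_map_keys _ hnd []]
  rw [PySem.Dict.keys_foldl_modify_key files pvLabId [] (fun _ file => (· ++ [file]))]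
  simp only [PySem.Dict.keys_empty, PySem.Set.update_nil_left, PySem.List.dedup_eq_ofList]
  apply List.map_congr_left
  intro k _
  rw [hfold, PySem.Dict.getD_foldl_modify_append]
  simp [List.filter_map, Function.comp_def]
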